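-- pv_equiv track=rewrite | github.com/JavierCunat/CS221Project | compat_scorer.py | same_metro
-- ===== SOURCE A (Python) =====
-- def extract_city(s: str) -> str:
--     if not s:
--         return ""
--     parts = [p.strip() for p in s.split(",")]
--     return parts[0].lower()
--
-- def same_metro(city_a: str, city_b: str) -> bool:
--     """Minimal metro heuristic; Fresno~Clovis considered same metro."""
--     a = extract_city(city_a)
--     b = extract_city(city_b)
--     metro_groups = [
--         {"fresno", "clovis"},
--         {"san francisco", "oakland", "berkeley", "redwood city", "palo alto", "menlo park", "burlingame", "san mateo"},
--         {"los angeles", "glendale", "pasadena", "santa monica", "culver city", "burbank"},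
--     ]
--     for g in metro_groups:
--         if a in g and b in g:
--             return True
--     return a == b and a != ""
-- ===== SOURCE B (Python) =====
-- # B: canonicalization instead of group scanning. Each known city is mapped to a
-- # representative (the first city of its metro group); unknown cities represent
-- # themselves. Two cities are in the same metro iff their representatives are
-- # equal (and nonempty). Correct because representatives are themselves known
-- # cities, so a known and an unknown city can never share a representative.
--
-- _GROUPS = [
--     ["fresno", "clovis"],
--     ["san francisco", "oakland", "berkeley", "redwood city", "palo alto", "menlo park", "burlingame", "san mateo"],
--     ["los angeles", "glendale", "pasadena", "santa monica", "culver city", "burbank"],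
-- ]
--
-- _REP = {c: g[0] for g in _GROUPS for c in g}
--
-- def _canon(s):
--     c = s.split(",")[0].strip().lower()
--     return _REP.get(c, c)
--
-- def same_metro(city_a, city_b):
--     a = _canon(city_a)
--     b = _canon(city_b)
--     return a == b and a != ""
-- ===== Notes on version B (the rewrite author's own statement) =====
-- stated objective: simpler
-- what changed: Reduces the decision to a single equality test by canonicalizing each city to a metro representative (group's first city, or itself if unknown), eliminating the group-membership scan and the separate equality fallback branch entirely.
import Mathlib
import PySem

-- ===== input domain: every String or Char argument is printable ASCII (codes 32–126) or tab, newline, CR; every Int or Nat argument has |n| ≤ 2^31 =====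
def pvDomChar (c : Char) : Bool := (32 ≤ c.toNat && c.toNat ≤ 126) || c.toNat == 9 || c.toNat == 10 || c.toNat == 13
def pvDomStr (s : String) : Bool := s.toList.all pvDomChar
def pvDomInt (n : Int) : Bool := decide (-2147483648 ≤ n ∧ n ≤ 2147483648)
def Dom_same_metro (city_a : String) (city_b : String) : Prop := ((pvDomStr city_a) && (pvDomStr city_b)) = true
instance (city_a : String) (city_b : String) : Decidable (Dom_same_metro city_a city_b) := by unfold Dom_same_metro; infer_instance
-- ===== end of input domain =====

-- B canonicalizes each city to a metro representative (its group's first city, else itself)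
-- and decides same-metro by one equality test, replacing A's group scan + fallback (simpler).


-- ===== PORT A =====
def extract_city (s : String) : String :=
  if s == "" then ""
  else
    let parts := ((PySem.Str.split? s ",").getD []).map PySem.Str.strip   -- sep "," nonempty, so split? is always some
    match PySem.List.pyGet? parts 0 with
    | some p => PySem.Str.lower p
    | none => ""   -- unreachable: str.split always returns a nonempty list

def metro_groups : List (PySem.Set String) :=
  [PySem.Set.ofList ["fresno", "clovis"],
   PySem.Set.ofList ["san francisco", "oakland", "berkeley", "redwood city", "palo alto", "menlo park", "burlingame", "san mateo"],
   PySem.Set.ofList ["los angeles", "glendale", "pasadena", "santa monica", "culver city", "burbank"]]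

def same_metro (city_a : String) (city_b : String) : Bool :=
  let a := extract_city city_a
  let b := extract_city city_b
  -- 'for g in metro_groups: if a in g and b in g: return True' then the fallback return
  if metro_groups.any (fun g => PySem.Set.contains g a && PySem.Set.contains g b) then true
  else a == b && !(a == "")

-- ===== PORT B =====
def groupsB : List (List String) :=
  [["fresno", "clovis"],
   ["san francisco", "oakland", "berkeley", "redwood city", "palo alto", "menlo park", "burlingame", "san mateo"],
   ["los angeles", "glendale", "pasadena", "santa monica", "culver city", "burbank"]]

-- _REP = {c: g[0] for g in _GROUPS for c in g}
def repMap : PySem.Dict String String :=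
  groupsB.foldl (fun d g => g.foldl (fun d c => d.insert c (g.headD "")) d) PySem.Dict.empty

def canon (s : String) : String :=
  -- s.split(",")[0].strip().lower(); split always returns a nonempty list, so [0] is its head
  let c := PySem.Str.lower (PySem.Str.strip (((PySem.Str.split? s ",").getD []).headD ""))
  repMap.getD c c

def same_metro_alt (city_a : String) (city_b : String) : Bool :=
  let a := canon city_a
  let b := canon city_b
  a == b && !(a == "")

-- ===== PRECONDITION & SPEC =====
def Spec_same_metro (city_a : String) (city_b : String) (out : Bool) : Prop := out = same_metro_alt city_a city_b
instance (city_a : String) (city_b : String) (out : Bool) : Decidable (Spec_same_metro city_a city_b out) := by unfold Spec_same_metro; infer_instance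

-- ===== CLAIM (what is proved, stated in full; the proofs are below) =====
def Claim_equal_same_metro : Prop := ∀ (city_a : String) (city_b : String), Dom_same_metro city_a city_b → Spec_same_metro city_a city_b (same_metro city_a city_b)

-- ===== LEMMAS AND PROOFS =====

-- the raw extracted (pre-canonicalization) city name of B equals A's extract_city
def rawCity (s : String) : String :=
  PySem.Str.lower (PySem.Str.strip (((PySem.Str.split? s ",").getD []).headD ""))

lemma extract_eq_raw (s : String) : extract_city s = rawCity s := by
  unfold extract_city rawCity
  by_cases h : s = ""
  · subst h; decide
  · simp only [beq_iff_eq, h, if_false]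
    cases hsp : (PySem.Str.split? s ",").getD [] with
    | nil => simp [PySem.List.pyGet?]; decide
    | cons p rest => simp [PySem.List.pyGet?, PySem.List.pyIdx?]

-- every city keyed by repMap, in order; used only by the proofs below
def allCities : List String :=
  ["fresno", "clovis",
   "san francisco", "oakland", "berkeley", "redwood city", "palo alto", "menlo park", "burlingame", "san mateo",
   "los angeles", "glendale", "pasadena", "santa monica", "culver city", "burbank"]

lemma keys_repMap : repMap.keys = allCities := by decide

lemma getD_self_of_unknown (b : String) (hb : b ∉ allCities) : repMap.getD b b = b := by
  rw [PySem.Dict.getD_eq_get?_getD]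
  have h : repMap.get? b = none := by
    rw [PySem.Dict.get?_eq_none_iff_not_mem_keys, keys_repMap]; exact hb
  rw [h]; rfl

lemma rep_mem (a : String) (ha : a ∈ allCities) : repMap.getD a a ∈ allCities := by
  fin_cases ha <;> decide

lemma contains_false (b : String) (hb : b ∉ allCities) :
    ∀ g ∈ metro_groups, PySem.Set.contains g b = false := by
  intro g hg
  fin_cases hg <;>
    · simp only [PySem.Set.contains, List.contains_eq_mem, decide_eq_false_iff_not]
      intro hmem
      rw [PySem.Set.mem_ofList] at hmem
      apply hb
      simp only [allCities, List.mem_cons, List.not_mem_nil, or_false]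
      simp only [List.mem_cons, List.not_mem_nil, or_false] at hmem
      tauto

lemma scan_false_right (a b : String) (hb : b ∉ allCities) :
    metro_groups.any (fun g => PySem.Set.contains g a && PySem.Set.contains g b) = false := by
  rw [List.any_eq_false]
  intro g hg
  rw [contains_false b hb g hg, Bool.and_false]
  simp

lemma scan_false_left (a b : String) (ha : a ∉ allCities) :
    metro_groups.any (fun g => PySem.Set.contains g a && PySem.Set.contains g b) = false := by
  rw [List.any_eq_false]
  intro g hg
  rw [contains_false a ha g hg, Bool.false_and]
  simp

lemma ne_of_mem_not_mem (x y : String) (hx : x ∈ allCities) (hy : y ∉ allCities) : (x == y) = false := by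
  simp only [beq_eq_false_iff_ne, ne_eq]
  rintro rfl; exact hy hx

-- the group scan + fallback equals the single representative comparison, for raw names
lemma core_eq (a b : String) :
    (if metro_groups.any (fun g => PySem.Set.contains g a && PySem.Set.contains g b) then true
     else a == b && !(a == "")) =
    (repMap.getD a a == repMap.getD b b && !(repMap.getD a a == "")) := by
  by_cases ha : a ∈ allCities
  · by_cases hb : b ∈ allCities
    · fin_cases ha <;> fin_cases hb <;> decide
    · rw [scan_false_right a b hb, getD_self_of_unknown b hb]
      simp only [Bool.false_eq_true, if_false]
      rw [ne_of_mem_not_mem a b ha hb, ne_of_mem_not_mem _ b (rep_mem a ha) hb]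
      simp
  · rw [scan_false_left a b ha, getD_self_of_unknown a ha]
    simp only [Bool.false_eq_true, if_false]
    by_cases hb : b ∈ allCities
    · have h1 : (a == b) = false := by
        simp only [beq_eq_false_iff_ne, ne_eq]; rintro rfl; exact ha hb
      have h2 : (a == repMap.getD b b) = false := by
        simp only [beq_eq_false_iff_ne, ne_eq]
        intro h; exact ha (h ▸ rep_mem b hb)
      rw [h1, h2]
    · rw [getD_self_of_unknown b hb]

-- ===== VERDICT (by name: the statement is the Claim_ definition above) =====
theorem same_metro_spec : Claim_equal_same_metro := by
  intro ca cb _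
  unfold Spec_same_metro same_metro same_metro_alt canon
  rw [extract_eq_raw ca, extract_eq_raw cb]
  exact core_eq (rawCity ca) (rawCity cb)
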